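-- pv_equiv track=rewrite | github.com/gone-case/Tambola | ticket_generator.py | validate_subgrid_count
-- ===== SOURCE A (Python) =====
-- def validate_subgrid_count(ticket):
--     """Validate no 3x3 subgrid has more than 6 numbers."""
--     for start_col in range(0, 7):
--         numbers_count = sum(1 for row in ticket
--                           for col in range(start_col, min(start_col + 3, 9))
--                           if row[col] != 0)
--         if numbers_count > 6:
--             return False
--     return True
-- ===== SOURCE B (Python) =====
-- def validate_subgrid_count(ticket):
--     """Validate no 3x3 subgrid has more than 6 numbers (sliding 3-column window)."""
--     def col_count(c):
--         return sum(1 for row in ticket if row[c] != 0)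
--     window = col_count(0) + col_count(1) + col_count(2)
--     if window > 6:
--         return False
--     for s in range(1, 7):
--         window += col_count(s + 2) - col_count(s - 1)
--         if window > 6:
--             return False
--     return True
-- ===== Notes on version B (the rewrite author's own statement) =====
-- stated objective: alternative
-- what changed: B replaces A's full-grid rescan per 3-column window by per-column nonzero counts combined into a sliding window sum updated incrementally (add the entering column, subtract the leaving one) across the 7 windows.
import Mathlib
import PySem

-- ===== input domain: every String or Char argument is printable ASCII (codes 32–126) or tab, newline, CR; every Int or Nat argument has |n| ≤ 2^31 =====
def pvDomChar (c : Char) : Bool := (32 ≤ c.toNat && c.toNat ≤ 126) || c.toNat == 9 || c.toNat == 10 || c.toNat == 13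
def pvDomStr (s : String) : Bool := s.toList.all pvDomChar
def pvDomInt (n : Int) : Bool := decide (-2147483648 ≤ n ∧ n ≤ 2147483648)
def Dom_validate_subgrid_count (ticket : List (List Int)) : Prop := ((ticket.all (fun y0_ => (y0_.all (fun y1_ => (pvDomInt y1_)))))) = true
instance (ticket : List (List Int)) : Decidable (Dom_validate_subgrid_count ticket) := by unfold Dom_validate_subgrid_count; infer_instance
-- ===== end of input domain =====

-- B replaces A's full-grid rescan per 3-column window by per-column counts combined into a
-- sliding window sum updated incrementally across the 7 windows (alternative algorithm).

-- ===== PORT A =====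
-- per-window generator sum: sum(1 for row in ticket for col in range(sc, min(sc+3, 9)) if row[col] != 0)
def pvWindowSumA (ticket : List (List Int)) (sc : Int) : Int :=
  ticket.foldl (fun acc row =>
    (PySem.List.pyRange sc (min (sc + 3) 9) 1).foldl
      (fun a col => if (PySem.List.pyGet? row col).getD 0 ≠ 0 then a + 1 else a) acc) 0

def validate_subgrid_count (ticket : List (List Int)) : Bool :=
  (PySem.List.pyRange 0 7 1).foldl
    (fun keep sc => if keep then (if pvWindowSumA ticket sc > 6 then false else true) else false)
    true

-- ===== PORT B =====
-- col_count(c) = sum(1 for row in ticket if row[c] != 0)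
def pvColCountB (ticket : List (List Int)) (c : Int) : Int :=
  ticket.foldl (fun acc row => if (PySem.List.pyGet? row c).getD 0 ≠ 0 then acc + 1 else acc) 0

-- the for-loop's early 'return False' is the none state of the fold
def validate_subgrid_count_alt (ticket : List (List Int)) : Bool :=
  let w0 := pvColCountB ticket 0 + pvColCountB ticket 1 + pvColCountB ticket 2
  if w0 > 6 then false
  else
    ((PySem.List.pyRange 1 7 1).foldl
      (fun st s =>
        match st with
        | none => none
        | some w =>
          let w' := w + pvColCountB ticket (s + 2) - pvColCountB ticket (s - 1)
          if w' > 6 then none else some w')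
      (some w0)).isSome

-- ===== PRECONDITION & SPEC =====
-- number of rows whose entry in column c is nonzero (used only to state Pre_)
def pvNonzeroCnt (ticket : List (List Int)) (c : Nat) : Int :=
  (ticket.countP (fun row => decide (row.getD c 0 ≠ 0)) : Int)

-- Pre_ = exactly the inputs on which Python A returns (no IndexError): either every row has
-- all 9 columns, or some window of three fully-present columns already holds more than 6
-- numbers, so the scan returns False before reaching any missing column.
def Pre_validate_subgrid_count (ticket : List (List Int)) : Prop :=
  (∀ row ∈ ticket, 9 ≤ row.length) ∨
  (∃ s : Nat, s ≤ 6 ∧ (∀ row ∈ ticket, s + 3 ≤ row.length) ∧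
    6 < pvNonzeroCnt ticket s + pvNonzeroCnt ticket (s + 1) + pvNonzeroCnt ticket (s + 2))

instance (ticket : List (List Int)) : Decidable (Pre_validate_subgrid_count ticket) := by
  unfold Pre_validate_subgrid_count; infer_instance

def pvWitness_validate_subgrid_count : List (List Int) :=
  [[1, 2, 0, 0, 3, 0, 0, 4, 0], [0, 0, 5, 6, 0, 0, 7, 0, 8], [9, 0, 0, 0, 1, 2, 0, 0, 3]]

def Spec_validate_subgrid_count (ticket : List (List Int)) (out : Bool) : Prop := out = validate_subgrid_count_alt ticket
instance (ticket : List (List Int)) (out : Bool) : Decidable (Spec_validate_subgrid_count ticket out) := by unfold Spec_validate_subgrid_count; infer_instance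

-- ===== CLAIM (what is proved, stated in full; the proofs are below) =====
def Claim_equal_validate_subgrid_count : Prop := ∀ (ticket : List (List Int)), Dom_validate_subgrid_count ticket → Pre_validate_subgrid_count ticket → Spec_validate_subgrid_count ticket (validate_subgrid_count ticket)

-- ===== LEMMAS AND PROOFS =====

-- 0/1 indicator of a nonzero entry at column c (proof-side only)
def pvInd (row : List Int) (c : Int) : Int :=
  if (PySem.List.pyGet? row c).getD 0 ≠ 0 then 1 else 0

-- B's column-count fold is an indicator sum
lemma pvColCountB_sum (ticket : List (List Int)) (c : Int) (acc : Int) :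
    ticket.foldl (fun a row => if (PySem.List.pyGet? row c).getD 0 ≠ 0 then a + 1 else a) acc
      = acc + (ticket.map (fun row => pvInd row c)).sum := by
  induction ticket generalizing acc with
  | nil => simp
  | cons r t ih =>
    simp only [List.foldl_cons, List.map_cons, List.sum_cons]
    rw [ih]
    by_cases h : (PySem.List.pyGet? r c).getD 0 ≠ 0
    · simp [pvInd, h]; ring
    · simp [pvInd, h]

-- A's per-window fold over three columns is the sum of the three indicator sums
lemma pvWindow_sum (ticket : List (List Int)) (c0 c1 c2 : Int) (acc : Int) :
    ticket.foldl (fun a row =>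
        ([c0, c1, c2] : List Int).foldl
          (fun a' col => if (PySem.List.pyGet? row col).getD 0 ≠ 0 then a' + 1 else a') a) acc
      = acc + (ticket.map (fun row => pvInd row c0 + pvInd row c1 + pvInd row c2)).sum := by
  induction ticket generalizing acc with
  | nil => simp
  | cons r t ih =>
    rw [List.foldl_cons, ih]
    simp only [List.map_cons, List.sum_cons, List.foldl_cons, List.foldl_nil]
    by_cases h0 : (PySem.List.pyGet? r c0).getD 0 ≠ 0 <;>
    by_cases h1 : (PySem.List.pyGet? r c1).getD 0 ≠ 0 <;>
    by_cases h2 : (PySem.List.pyGet? r c2).getD 0 ≠ 0 <;>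
    simp [pvInd, h0, h1, h2] <;> ring

-- A's window sum equals the sum of B's three column counts
lemma pvWindowSumA_eq (ticket : List (List Int)) (sc : Int) (h0 : 0 ≤ sc) (h6 : sc ≤ 6) :
    pvWindowSumA ticket sc
      = pvColCountB ticket sc + pvColCountB ticket (sc + 1) + pvColCountB ticket (sc + 2) := by
  have hmin : min (sc + 3) 9 = sc + 3 := by omega
  have hr : PySem.List.pyRange sc (sc + 3) 1 = [sc, sc + 1, sc + 2] := by
    rw [PySem.List.pyRange_one_cons (by omega), PySem.List.pyRange_one_cons (by omega),
        PySem.List.pyRange_one_cons (by omega), PySem.List.pyRange_one_eq_nil (by omega)]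
    norm_num
    omega
  unfold pvWindowSumA pvColCountB
  rw [hmin, hr, pvWindow_sum ticket sc (sc + 1) (sc + 2) 0,
      pvColCountB_sum ticket sc 0, pvColCountB_sum ticket (sc + 1) 0,
      pvColCountB_sum ticket (sc + 2) 0]
  simp

-- shape of one step of A's early-return loop
lemma pvStepShape (b : Bool) (w : Int) :
    (if b then (if w > 6 then false else true) else false) = (b && decide (w ≤ 6)) := by
  by_cases h : w ≤ 6
  · have h' : ¬ w > 6 := by omega
    simp [h, h']
  · have h' : w > 6 := by omega
    simp [h, h']

-- ===== VERDICT (by name: the statement is the Claim_ definition above) =====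
theorem validate_subgrid_count_spec : Claim_equal_validate_subgrid_count := by
  intro ticket _ _
  unfold Spec_validate_subgrid_count validate_subgrid_count validate_subgrid_count_alt
  have h7 : PySem.List.pyRange 0 7 1 = [0, 1, 2, 3, 4, 5, 6] := by decide
  have h16 : PySem.List.pyRange 1 7 1 = [1, 2, 3, 4, 5, 6] := by decide
  rw [h7, h16]
  simp only [List.foldl_cons, List.foldl_nil, pvStepShape]
  rw [pvWindowSumA_eq ticket 0 (by omega) (by omega), pvWindowSumA_eq ticket 1 (by omega) (by omega),
      pvWindowSumA_eq ticket 2 (by omega) (by omega), pvWindowSumA_eq ticket 3 (by omega) (by omega),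
      pvWindowSumA_eq ticket 4 (by omega) (by omega), pvWindowSumA_eq ticket 5 (by omega) (by omega),
      pvWindowSumA_eq ticket 6 (by omega) (by omega)]
  norm_num
  set x0 := pvColCountB ticket 0 with hx0
  set x1 := pvColCountB ticket 1 with hx1
  set x2 := pvColCountB ticket 2 with hx2
  set x3 := pvColCountB ticket 3 with hx3
  set x4 := pvColCountB ticket 4 with hx4
  set x5 := pvColCountB ticket 5 with hx5
  set x6 := pvColCountB ticket 6 with hx6
  set x7 := pvColCountB ticket 7 with hx7
  set x8 := pvColCountB ticket 8 with hx8
  by_cases h0 : x0 + x1 + x2 > 6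
  · simp [h0, show ¬ (x0 + x1 + x2 ≤ 6) by omega]
  · simp only [if_neg h0, List.foldl_cons, List.foldl_nil,
      show (x0 + x1 + x2 + x3 - x0) = x1 + x2 + x3 by ring]
    by_cases h1 : x1 + x2 + x3 > 6
    · simp [h1, show ¬ (x1 + x2 + x3 ≤ 6) by omega,
        show (x0 + x1 + x2 ≤ 6) by omega]
    · simp only [if_neg h1, show (x1 + x2 + x3 + x4 - x1) = x2 + x3 + x4 by ring]
      by_cases h2 : x2 + x3 + x4 > 6
      · simp [h2, show ¬ (x2 + x3 + x4 ≤ 6) by omega,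
          show (x0 + x1 + x2 ≤ 6) by omega, show (x1 + x2 + x3 ≤ 6) by omega]
      · simp only [if_neg h2, show (x2 + x3 + x4 + x5 - x2) = x3 + x4 + x5 by ring]
        by_cases h3 : x3 + x4 + x5 > 6
        · simp [h3, show ¬ (x3 + x4 + x5 ≤ 6) by omega,
            show (x0 + x1 + x2 ≤ 6) by omega, show (x1 + x2 + x3 ≤ 6) by omega,
            show (x2 + x3 + x4 ≤ 6) by omega]
        · simp only [if_neg h3, show (x3 + x4 + x5 + x6 - x3) = x4 + x5 + x6 by ring]
          by_cases h4 : x4 + x5 + x6 > 6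
          · simp [h4, show ¬ (x4 + x5 + x6 ≤ 6) by omega,
              show (x0 + x1 + x2 ≤ 6) by omega, show (x1 + x2 + x3 ≤ 6) by omega,
              show (x2 + x3 + x4 ≤ 6) by omega, show (x3 + x4 + x5 ≤ 6) by omega]
          · simp only [if_neg h4, show (x4 + x5 + x6 + x7 - x4) = x5 + x6 + x7 by ring]
            by_cases h5 : x5 + x6 + x7 > 6
            · simp [h5, show ¬ (x5 + x6 + x7 ≤ 6) by omega,
                show (x0 + x1 + x2 ≤ 6) by omega, show (x1 + x2 + x3 ≤ 6) by omega,
                show (x2 + x3 + x4 ≤ 6) by omega, show (x3 + x4 + x5 ≤ 6) by omega,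
                show (x4 + x5 + x6 ≤ 6) by omega]
            · simp only [if_neg h5, show (x5 + x6 + x7 + x8 - x5) = x6 + x7 + x8 by ring]
              by_cases h6 : x6 + x7 + x8 > 6
              · simp [h6, show ¬ (x6 + x7 + x8 ≤ 6) by omega,
                  show (x0 + x1 + x2 ≤ 6) by omega, show (x1 + x2 + x3 ≤ 6) by omega,
                  show (x2 + x3 + x4 ≤ 6) by omega, show (x3 + x4 + x5 ≤ 6) by omega,
                  show (x4 + x5 + x6 ≤ 6) by omega, show (x5 + x6 + x7 ≤ 6) by omega]
              · simp [if_neg h6,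
                  show (x0 + x1 + x2 ≤ 6) by omega, show (x1 + x2 + x3 ≤ 6) by omega,
                  show (x2 + x3 + x4 ≤ 6) by omega, show (x3 + x4 + x5 ≤ 6) by omega,
                  show (x4 + x5 + x6 ≤ 6) by omega, show (x5 + x6 + x7 ≤ 6) by omega,
                  show (x6 + x7 + x8 ≤ 6) by omega]
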